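-- pv_equiv track=rewrite | github.com/jahn96/thesis | evaluation/factual_consistency/srl2Tree.py | get_fact_start_and_end_idx
-- ===== SOURCE A (Python) =====
-- def get_fact_start_and_end_idx(tags):
--     b_idx = 0
--     e_idx = len(tags) - 1
--     # Fact begin index
--     while b_idx < len(tags) and tags[b_idx] == "O":
--         b_idx += 1
--     # Fact end index
--     while e_idx >= 0 and tags[e_idx] == "O":
--         e_idx -= 1
--     e_idx += 1
--     return b_idx, e_idx
-- ===== SOURCE B (Python) =====
-- def get_fact_start_and_end_idx(tags):
--     idxs = [i for i, t in enumerate(tags) if t != "O"]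
--     if idxs:
--         return idxs[0], idxs[-1] + 1
--     return len(tags), 0
-- ===== Notes on version B (the rewrite author's own statement) =====
-- stated objective: simpler
-- what changed: Replaces A's two bidirectional early-terminating while loops with one forward pass collecting all non-'O' indices and reading the first and last of that list.
import Mathlib
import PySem

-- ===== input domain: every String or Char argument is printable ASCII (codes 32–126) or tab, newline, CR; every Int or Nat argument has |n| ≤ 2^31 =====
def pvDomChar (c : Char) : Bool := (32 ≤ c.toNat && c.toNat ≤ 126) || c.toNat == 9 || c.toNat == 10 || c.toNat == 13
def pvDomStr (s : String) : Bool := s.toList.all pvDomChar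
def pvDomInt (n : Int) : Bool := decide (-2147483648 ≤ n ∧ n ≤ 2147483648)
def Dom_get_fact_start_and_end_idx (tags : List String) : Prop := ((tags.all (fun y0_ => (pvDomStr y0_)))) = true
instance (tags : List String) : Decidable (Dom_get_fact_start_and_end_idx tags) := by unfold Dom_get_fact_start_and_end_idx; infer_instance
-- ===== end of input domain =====

-- B replaces A's two bidirectional early-terminating while loops by one forward pass
-- collecting the non-"O" indices and reading the first and last of that list (simpler decomposition).


-- ===== PORT A =====
def aBegin (tags : List String) (i : Nat) : Nat :=
  if h : i < tags.length ∧ tags.getD i "" = "O" then aBegin tags (i + 1) else i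
termination_by tags.length - i
decreasing_by omega

-- A's second while loop: j is e_idx+1 (so j = 0 means e_idx = -1 and the loop stops).
def aEnd (tags : List String) : Nat → Int
  | 0 => -1
  | j + 1 => if tags.getD j "" = "O" then aEnd tags j else (j : Int)

def get_fact_start_and_end_idx (tags : List String) : Int × Int :=
  let b_idx := aBegin tags 0
  let e_idx := aEnd tags tags.length
  ((b_idx : Int), e_idx + 1)


-- ===== PORT B =====
-- the list comprehension [i for i, t in enumerate(tags) if t != "O"]
def nonOIdxs (tags : List String) (i : Nat) : List Nat :=
  match tags with
  | [] => []
  | t :: rest => if t ≠ "O" then i :: nonOIdxs rest (i + 1) else nonOIdxs rest (i + 1)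

def get_fact_start_and_end_idx_alt (tags : List String) : Int × Int :=
  match nonOIdxs tags 0 with
  | [] => ((tags.length : Int), 0)
  | i :: rest => ((i : Int), ((i :: rest).getLast (by simp) : Int) + 1)


-- ===== PRECONDITION & SPEC =====
def Spec_get_fact_start_and_end_idx (tags : List String) (out : Int × Int) : Prop := out = get_fact_start_and_end_idx_alt tags
instance (tags : List String) (out : Int × Int) : Decidable (Spec_get_fact_start_and_end_idx tags out) := by unfold Spec_get_fact_start_and_end_idx; infer_instance

-- ===== CLAIM (what is proved, stated in full; the proofs are below) =====
def Claim_equal_get_fact_start_and_end_idx : Prop := ∀ (tags : List String), Dom_get_fact_start_and_end_idx tags → Spec_get_fact_start_and_end_idx tags (get_fact_start_and_end_idx tags)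

-- ===== LEMMAS AND PROOFS =====

lemma aBegin_shift (t : String) (rest : List String) (i : Nat) :
    aBegin (t :: rest) (i + 1) = aBegin rest i + 1 := by
  fun_induction aBegin rest i with
  | case1 i h ih =>
      rw [aBegin, dif_pos ⟨by simp only [List.length_cons]; omega,
        by simpa [List.getD_cons_succ] using h.2⟩]
      exact ih
  | case2 i h =>
      rw [aBegin, dif_neg]
      intro hc
      exact h ⟨by have := hc.1; simp only [List.length_cons] at this; omega,
        by simpa [List.getD_cons_succ] using hc.2⟩

lemma aEnd_succ (tags : List String) (j : Nat) :
    aEnd tags (j + 1) = if tags.getD j "" = "O" then aEnd tags j else (j : Int) := rfl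

lemma aEnd_cons (t : String) (rest : List String) (j : Nat) :
    aEnd (t :: rest) (j + 1) =
      if aEnd rest j = -1 then (if t = "O" then -1 else (0 : Int))
      else aEnd rest j + 1 := by
  induction j with
  | zero => simp [aEnd]
  | succ j ih =>
      rw [aEnd_succ (t :: rest) (j + 1), aEnd_succ rest j, List.getD_cons_succ]
      by_cases hO : rest.getD j "" = "O"
      · rw [if_pos hO, if_pos hO, ih]
      · rw [if_neg hO, if_neg hO, if_neg (by omega)]
        push_cast; ring

lemma nonOIdxs_shift (tags : List String) (i : Nat) :
    nonOIdxs tags (i + 1) = (nonOIdxs tags i).map (· + 1) := by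
  induction tags generalizing i with
  | nil => simp [nonOIdxs]
  | cons t rest ih => by_cases h : t = "O" <;> simp [nonOIdxs, h, ih]

lemma nonOIdxs_cons_O (rest : List String) (i : Nat) :
    nonOIdxs ("O" :: rest) i = nonOIdxs rest (i + 1) := by simp [nonOIdxs]

lemma nonOIdxs_cons_ne (t : String) (rest : List String) (i : Nat) (h : t ≠ "O") :
    nonOIdxs (t :: rest) i = i :: nonOIdxs rest (i + 1) := by simp [nonOIdxs, h]

lemma aBegin_head (tags : List String) :
    aBegin tags 0 = ((nonOIdxs tags 0).headD tags.length) := by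
  induction tags with
  | nil => simp [aBegin, nonOIdxs]
  | cons t rest ih =>
      by_cases h : t = "O"
      · subst h
        rw [aBegin, dif_pos ⟨by simp, by simp⟩, aBegin_shift, ih,
          nonOIdxs_cons_O, nonOIdxs_shift]
        cases nonOIdxs rest 0 <;> simp
      · rw [aBegin, dif_neg (by simp [h]), nonOIdxs_cons_ne t rest 0 h]
        simp

lemma aEnd_last (tags : List String) :
    aEnd tags tags.length =
      match (nonOIdxs tags 0).getLast? with
      | none => (-1 : Int)
      | some j => (j : Int) := by
  induction tags with
  | nil => simp [aEnd, nonOIdxs]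
  | cons t rest ih =>
      rw [List.length_cons, aEnd_cons, ih]
      by_cases h : t = "O"
      · subst h
        rw [nonOIdxs_cons_O, nonOIdxs_shift]
        cases hr : (nonOIdxs rest 0).getLast? with
        | none => simp [List.getLast?_map, hr]
        | some j =>
            have hj : ((j : Int)) ≠ -1 := by omega
            simp [List.getLast?_map, hr, hj]
      · rw [nonOIdxs_cons_ne t rest 0 h, nonOIdxs_shift]
        cases hr : (nonOIdxs rest 0).getLast? with
        | none =>
            have he : nonOIdxs rest 0 = [] := List.getLast?_eq_none_iff.mp hr
            simp [he, h]
        | some j =>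
            have hj : ((j : Int)) ≠ -1 := by omega
            simp [List.getLast?_cons, List.getLast?_map, hr, hj]

-- ===== VERDICT (by name: the statement is the Claim_ definition above) =====
theorem get_fact_start_and_end_idx_spec : Claim_equal_get_fact_start_and_end_idx := by
  intro tags _
  unfold Spec_get_fact_start_and_end_idx get_fact_start_and_end_idx get_fact_start_and_end_idx_alt
  have hb := aBegin_head tags
  have he := aEnd_last tags
  cases h : nonOIdxs tags 0 with
  | nil =>
      rw [h] at hb he
      simp only [List.headD_nil] at hb
      simp only [List.getLast?_nil] at he
      simp [hb, he]
  | cons i r =>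
      rw [h] at hb he
      rw [List.getLast?_eq_some_getLast (l := i :: r) (by simp)] at he
      simp only [List.headD_cons] at hb
      simp [hb, he]
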